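-- pv_equiv track=rewrite | github.com/gabejchambers/cmsc-416-project-3-tagging | tagger.py | createFreqency
-- ===== SOURCE A (Python) =====
-- def createFreqency(pairs):
--     table = {}
--     for pair in pairs:
--         word = pair[0]
--         tag = pair[1]
--         if word in table:
--             if tag in table[word]:
--                 table[word][tag] += 1
--             else:
--                 table[word][tag] = 1
--         else:
--             table[word] = {tag: 1}
--     return table
-- ===== SOURCE B (Python) =====
-- def createFreqency(pairs):
--     counts = {}
--     for pair in pairs:
--         key = (pair[0], pair[1])
--         counts[key] = counts.get(key, 0) + 1
--     table = {}
--     for (word, tag), n in counts.items():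
--         table.setdefault(word, {})[tag] = n
--     return table
-- ===== Notes on version B (the rewrite author's own statement) =====
-- stated objective: alternative
-- what changed: Instead of incrementally updating a nested dict per pair, B first builds a flat frequency dict keyed by the (word, tag) tuple in one pass and then reshapes it into the nested table with setdefault in a second pass.
import Mathlib
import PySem

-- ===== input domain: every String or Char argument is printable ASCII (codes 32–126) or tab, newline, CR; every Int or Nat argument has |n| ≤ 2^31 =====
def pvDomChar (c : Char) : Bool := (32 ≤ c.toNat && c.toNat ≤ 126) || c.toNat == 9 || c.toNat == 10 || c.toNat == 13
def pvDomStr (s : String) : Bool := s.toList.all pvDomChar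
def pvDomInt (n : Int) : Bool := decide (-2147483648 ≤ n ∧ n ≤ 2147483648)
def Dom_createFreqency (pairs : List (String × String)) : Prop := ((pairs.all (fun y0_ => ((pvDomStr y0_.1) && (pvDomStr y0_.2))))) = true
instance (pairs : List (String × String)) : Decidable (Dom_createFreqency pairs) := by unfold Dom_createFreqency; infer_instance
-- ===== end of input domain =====

-- B replaces A's incremental nested-dict counting by a flat (word, tag)-pair frequency dict built
-- in one pass and reshaped into the nested table in a second pass (objective: alternative).


-- ===== PORT A =====
-- loop body of A: one pair updates the nested table
def cfStepA (table : PySem.Dict String (PySem.Dict String Int)) (pair : String × String) :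
    PySem.Dict String (PySem.Dict String Int) :=
  let word := pair.1
  let tag := pair.2
  if table.contains word then
    if (table.getD word PySem.Dict.empty).contains tag then
      -- table[word][tag] += 1 (in-place update of the inner dict)
      table.insert word ((table.getD word PySem.Dict.empty).insert tag
        ((table.getD word PySem.Dict.empty).getD tag 0 + 1))
    else
      -- table[word][tag] = 1
      table.insert word ((table.getD word PySem.Dict.empty).insert tag 1)
  else
    -- table[word] = {tag: 1}
    table.insert word (PySem.Dict.ofList [(tag, 1)])

def createFreqency (pairs : List (String × String)) : List (String × List (String × Int)) :=
  (pairs.foldl cfStepA PySem.Dict.empty).items.map (fun q => (q.1, q.2.items))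

-- ===== PORT B =====
-- first pass: counts[(pair[0], pair[1])] = counts.get(key, 0) + 1
def cfCountStep (d : PySem.Dict (String × String) Int) (pair : String × String) :
    PySem.Dict (String × String) Int :=
  d.insert (pair.1, pair.2) (d.getD (pair.1, pair.2) 0 + 1)

-- second pass: table.setdefault(word, {})[tag] = n (in-place assignment into the inner dict)
def cfReshapeStep (t : PySem.Dict String (PySem.Dict String Int)) (q : (String × String) × Int) :
    PySem.Dict String (PySem.Dict String Int) :=
  t.insert q.1.1 ((t.getD q.1.1 PySem.Dict.empty).insert q.1.2 q.2)

def createFreqency_alt (pairs : List (String × String)) : List (String × List (String × Int)) :=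
  let counts := pairs.foldl cfCountStep PySem.Dict.empty
  let table := counts.items.foldl cfReshapeStep PySem.Dict.empty
  table.items.map (fun q => (q.1, q.2.items))

-- ===== PRECONDITION & SPEC =====
def Spec_createFreqency (pairs : List (String × String)) (out : List (String × List (String × Int))) : Prop := out = createFreqency_alt pairs
instance (pairs : List (String × String)) (out : List (String × List (String × Int))) : Decidable (Spec_createFreqency pairs out) := by unfold Spec_createFreqency; infer_instance

-- ===== CLAIM (what is proved, stated in full; the proofs are below) =====
def Claim_equal_createFreqency : Prop := ∀ (pairs : List (String × String)), Dom_createFreqency pairs → Spec_createFreqency pairs (createFreqency pairs)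

-- ===== LEMMAS AND PROOFS =====

theorem find?_beq_mem (ws : List String) (w : String) :
    ws.find? (fun x => x == w) = if w ∈ ws then some w else none := by
  induction ws with
  | nil => simp
  | cons h t ih =>
    by_cases hw : h = w
    · subst hw; simp
    · simp [beq_iff_eq, hw, ih, Ne.symm hw]

theorem find?_filter_pair (K : List (String × String)) (w tg : String) :
    (K.filter (fun q => q.1 == w)).find? (fun q => q.2 == tg) =
      if (w, tg) ∈ K then some (w, tg) else none := by
  induction K with
  | nil => simp
  | cons h t ih =>
    by_cases h1 : h.1 = w
    · by_cases h2 : h.2 = tg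
      · have he : h = (w, tg) := by ext <;> simp [h1, h2]
        subst he; simp
      · have hne : h ≠ (w, tg) := by intro e; exact h2 (by rw [e])
        simp [h1, beq_iff_eq, h2, ih, Ne.symm hne]
    · have hne : h ≠ (w, tg) := by intro e; exact h1 (by rw [e])
      simp [h1, ih, Ne.symm hne]

def mkCanon (K : List (String × String)) (cnt : (String × String) → Int) :
    PySem.Dict String (PySem.Dict String Int) :=
  PySem.Dict.mk ((PySem.Set.ofList (K.map (·.1))).map (fun w =>
    (w, PySem.Dict.mk ((K.filter (fun q => q.1 == w)).map (fun q => (q.2, cnt q))))))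

theorem get?_mkCanon (K : List (String × String)) (cnt : (String × String) → Int) (w : String) :
    (mkCanon K cnt).get? w =
      if w ∈ PySem.Set.ofList (K.map (·.1)) then
        some (PySem.Dict.mk ((K.filter (fun q => q.1 == w)).map (fun q => (q.2, cnt q))))
      else none := by
  unfold mkCanon
  simp [PySem.Dict.get?, List.find?_map, Function.comp_def, find?_beq_mem]

theorem contains_mkCanon (K : List (String × String)) (cnt : (String × String) → Int) (w : String) :
    (mkCanon K cnt).contains w = decide (w ∈ PySem.Set.ofList (K.map (·.1))) := by
  rw [PySem.Dict.contains_eq_isSome_get?, get?_mkCanon]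
  split <;> simp_all

theorem get?_inner_mkCanon (K : List (String × String)) (cnt : (String × String) → Int)
    (w tg : String) :
    (PySem.Dict.mk ((K.filter (fun q => q.1 == w)).map (fun q => (q.2, cnt q)))).get? tg =
      if (w, tg) ∈ K then some (cnt (w, tg)) else none := by
  simp only [PySem.Dict.get?]
  rw [List.find?_map]
  simp only [Function.comp_def]
  rw [find?_filter_pair]
  split <;> simp

theorem canon_congr (K : List (String × String)) (cnt cnt' : (String × String) → Int)
    (h : ∀ q ∈ K, cnt q = cnt' q) : mkCanon K cnt = mkCanon K cnt' := by
  unfold mkCanon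
  apply PySem.Dict.ext
  apply List.map_congr_left
  intro w _
  congr 1
  apply PySem.Dict.ext
  apply List.map_congr_left
  intro q hq
  rw [h q (List.mem_of_mem_filter hq)]

theorem count_append_singleton_int (l : List (String × String)) (p q : String × String) :
    (((l ++ [p]).count q : Nat) : Int) = ((l.count q : Nat) : Int) + if q = p then 1 else 0 := by
  rw [List.count_append]
  by_cases h : q = p
  · simp [h]
  · simp [h, List.count_eq_zero.mpr (by simp [h] : q ∉ [p])]

theorem stepB_canon (K : List (String × String)) (k : String × String) (hk : k ∉ K)
    (cnt : (String × String) → Int) :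
    cfReshapeStep (mkCanon K cnt) (k, cnt k) = mkCanon (K ++ [k]) cnt := by
  unfold cfReshapeStep
  have hgetD : (mkCanon K cnt).getD k.1 PySem.Dict.empty =
      if k.1 ∈ PySem.Set.ofList (K.map (·.1)) then
        PySem.Dict.mk ((K.filter (fun q => q.1 == k.1)).map (fun q => (q.2, cnt q)))
      else PySem.Dict.empty := by
    rw [PySem.Dict.getD_eq_get?_getD, get?_mkCanon]; split <;> rfl
  by_cases hw : k.1 ∈ PySem.Set.ofList (K.map (·.1))
  · -- word already present: outer replaces in place, inner appends the fresh tag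
    have hinner : ((PySem.Dict.mk ((K.filter (fun q => q.1 == k.1)).map
        (fun q => (q.2, cnt q)))).insert k.2 (cnt k)).items =
        (K.filter (fun q => q.1 == k.1)).map (fun q => (q.2, cnt q)) ++ [(k.2, cnt k)] := by
      rw [PySem.Dict.items_insert_of_not_contains]
      rw [PySem.Dict.contains_eq_isSome_get?, get?_inner_mkCanon]
      simp [hk]
    have hcont : (mkCanon K cnt).contains k.1 = true := by
      rw [contains_mkCanon]; simp [hw]
    rw [hgetD, if_pos hw]
    apply PySem.Dict.ext
    rw [PySem.Dict.items_insert_of_contains _ _ hcont]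
    unfold mkCanon
    simp only [List.map_map, List.map_append, List.filter_append,
      List.map_singleton]
    rw [PySem.Set.ofList_append_singleton, PySem.Set.add_of_mem hw]
    apply List.map_congr_left
    intro w hmem
    by_cases hwk : w = k.1
    · subst hwk
      simp only [Function.comp_def, beq_self_eq_true, if_true]
      congr 1
      apply PySem.Dict.ext
      rw [hinner]
      simp
    · simp [hwk, Ne.symm hwk]
  · -- new word: outer appends, inner dict is {tag: cnt k}
    have hcont : (mkCanon K cnt).contains k.1 = false := by
      rw [contains_mkCanon]; simp [hw]
    rw [hgetD, if_neg hw]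
    apply PySem.Dict.ext
    rw [PySem.Dict.items_insert_of_not_contains _ _ hcont]
    unfold mkCanon
    simp only [List.map_append, List.filter_append, List.map_singleton]
    rw [PySem.Set.ofList_append_singleton, PySem.Set.add_of_not_mem hw, List.map_append]
    congr 1
    · apply List.map_congr_left
      intro w hmem
      have hwk : w ≠ k.1 := fun e => hw (e ▸ hmem)
      simp [Ne.symm hwk]
    · have hfil : K.filter (fun q => q.1 == k.1) = [] := by
        rw [List.filter_eq_nil_iff]
        intro q hq hq1
        exact hw (by rw [PySem.Set.mem_ofList]; exact List.mem_map.mpr ⟨q, hq, by simpa using hq1⟩)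
      simp [hfil, List.filter_singleton, PySem.Dict.insert, PySem.Dict.empty, PySem.Dict.contains]

theorem reshape_eq (K : List (String × String)) (hK : K.Nodup) (cnt : (String × String) → Int) :
    (K.map (fun k => (k, cnt k))).foldl cfReshapeStep PySem.Dict.empty = mkCanon K cnt := by
  induction K using List.reverseRecOn with
  | nil => rfl
  | append_singleton K k ih =>
    rw [List.nodup_append] at hK
    obtain ⟨hK1, -, hdisj⟩ := hK
    have hk : k ∉ K := fun h => by simpa using hdisj k h
    rw [List.map_append, List.foldl_append, ih hK1]
    simpa using stepB_canon K k hk cnt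

theorem stepA_canon (l : List (String × String)) (p : String × String) :
    cfStepA (mkCanon (PySem.Set.ofList l) (fun q => (l.count q : Int))) p =
      mkCanon (PySem.Set.ofList (l ++ [p])) (fun q => ((l ++ [p]).count q : Int)) := by
  have hKl : ∀ q, q ∈ PySem.Set.ofList l ↔ q ∈ l := fun q => PySem.Set.mem_ofList l q
  have hcnt : ∀ q, (((l ++ [p]).count q : Nat) : Int) =
      ((l.count q : Nat) : Int) + if q = p then 1 else 0 := count_append_singleton_int l p
  have hgetD : ∀ cnt, (mkCanon (PySem.Set.ofList l) cnt).getD p.1 PySem.Dict.empty =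
      if p.1 ∈ PySem.Set.ofList ((PySem.Set.ofList l).map (·.1)) then
        PySem.Dict.mk (((PySem.Set.ofList l).filter (fun q => q.1 == p.1)).map
          (fun q => (q.2, cnt q)))
      else PySem.Dict.empty := by
    intro cnt
    rw [PySem.Dict.getD_eq_get?_getD, get?_mkCanon]; split <;> rfl
  rw [PySem.Set.ofList_append_singleton]
  by_cases hpl : p ∈ l
  · -- the pair was seen before: A increments table[word][tag] in place
    have hpK : p ∈ PySem.Set.ofList l := (hKl p).2 hpl
    have hw : p.1 ∈ PySem.Set.ofList ((PySem.Set.ofList l).map (·.1)) := by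
      rw [PySem.Set.mem_ofList]
      exact List.mem_map.mpr ⟨p, hpK, rfl⟩
    rw [PySem.Set.add_of_mem hpK]
    have hcont : (mkCanon (PySem.Set.ofList l) (fun q => (l.count q : Int))).contains p.1 = true := by
      rw [contains_mkCanon]; simp [hw]
    have hicont : (PySem.Dict.mk (((PySem.Set.ofList l).filter (fun q => q.1 == p.1)).map
        (fun q => (q.2, (l.count q : Int))))).contains p.2 = true := by
      rw [PySem.Dict.contains_eq_isSome_get?, get?_inner_mkCanon]
      simp [hpK]
    have higetD : (PySem.Dict.mk (((PySem.Set.ofList l).filter (fun q => q.1 == p.1)).map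
        (fun q => (q.2, (l.count q : Int))))).getD p.2 0 = (l.count p : Int) := by
      rw [PySem.Dict.getD_eq_get?_getD, get?_inner_mkCanon]
      simp [hpK]
    unfold cfStepA
    simp only [hgetD, if_pos hw, hcont, if_true, hicont, higetD]
    apply PySem.Dict.ext
    rw [PySem.Dict.items_insert_of_contains _ _ hcont]
    unfold mkCanon
    simp only [List.map_map]
    apply List.map_congr_left
    intro w hm
    by_cases hwp : w = p.1
    · subst hwp
      simp only [Function.comp_def, beq_self_eq_true, if_true]
      congr 1
      apply PySem.Dict.ext
      rw [PySem.Dict.items_insert_of_contains _ _ hicont]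
      simp only [List.map_map]
      apply List.map_congr_left
      intro q hq
      have hq1 : q.1 = p.1 := by simpa using List.of_mem_filter hq
      by_cases hq2 : q.2 = p.2
      · have hqp : q = p := by ext <;> simp [hq1, hq2]
        subst hqp
        simp
      · have hqp : q ≠ p := fun e => hq2 (by rw [e])
        have hcq : List.count q [p] = 0 := List.count_eq_zero.mpr (by simp [hqp])
        simp [hq2, hcq]
    · simp only [Function.comp_def, beq_iff_eq, hwp, if_false]
      congr 1
      apply PySem.Dict.ext
      apply List.map_congr_left
      intro q hq
      have hq1 : q.1 = w := by simpa using List.of_mem_filter hq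
      have hqp : q ≠ p := fun e => hwp (by rw [← hq1, e])
      have hcq : List.count q [p] = 0 := List.count_eq_zero.mpr (by simp [hqp])
      simp [hcq]
  · -- fresh pair: A's step coincides with B's reshape step for this key
    have hpK : p ∉ PySem.Set.ofList l := fun h => hpl ((hKl p).1 h)
    have hc0 : l.count p = 0 := List.count_eq_zero.mpr hpl
    have hcongr : mkCanon (PySem.Set.ofList l) (fun q => (l.count q : Int)) =
        mkCanon (PySem.Set.ofList l) (fun q => ((l ++ [p]).count q : Int)) := by
      apply canon_congr
      intro q hq
      have hqp : q ≠ p := fun e => hpK (e ▸ hq)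
      have hcq : List.count q [p] = 0 := List.count_eq_zero.mpr (by simp [hqp])
      simp [hcq]
    have hcntp : (((l ++ [p]).count p : Nat) : Int) = 1 := by
      simp [hc0]
    rw [PySem.Set.add_of_not_mem hpK, hcongr]
    rw [← stepB_canon (PySem.Set.ofList l) p hpK (fun q => ((l ++ [p]).count q : Int))]
    unfold cfStepA cfReshapeStep
    simp only [hcntp]
    by_cases hw : (mkCanon (PySem.Set.ofList l)
        (fun q => ((l ++ [p]).count q : Int))).contains p.1 = true
    · have hicont : ((mkCanon (PySem.Set.ofList l)
          (fun q => ((l ++ [p]).count q : Int))).getD p.1 PySem.Dict.empty).contains p.2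
          = false := by
        rw [hgetD]
        split
        · rw [PySem.Dict.contains_eq_isSome_get?, get?_inner_mkCanon]
          simp [hpK]
        · simp [PySem.Dict.contains, PySem.Dict.empty]
      simp only [hw, hicont, if_true, Bool.false_eq_true, if_false]
    · have hw' : (mkCanon (PySem.Set.ofList l)
          (fun q => ((l ++ [p]).count q : Int))).contains p.1 = false := by
        simpa using hw
      have hge : (mkCanon (PySem.Set.ofList l)
          (fun q => ((l ++ [p]).count q : Int))).getD p.1 PySem.Dict.empty =
          PySem.Dict.empty := by
        rw [hgetD]
        rw [contains_mkCanon] at hw'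
        simp only [decide_eq_false_iff_not] at hw'
        simp [hw']
      simp only [hw', Bool.false_eq_true, if_false, hge]
      rfl

theorem foldA_eq (l : List (String × String)) :
    l.foldl cfStepA PySem.Dict.empty = mkCanon (PySem.Set.ofList l) (fun q => (l.count q : Int)) := by
  induction l using List.reverseRecOn with
  | nil => rfl
  | append_singleton l p ih =>
    rw [List.foldl_append, ih]
    simpa using stepA_canon l p

-- ===== VERDICT (by name: the statement is the Claim_ definition above) =====
theorem createFreqency_spec : Claim_equal_createFreqency := by
  intro pairs _
  unfold Spec_createFreqency createFreqency createFreqency_alt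
  show (pairs.foldl cfStepA PySem.Dict.empty).items.map (fun q => (q.1, q.2.items)) =
    ((pairs.foldl cfCountStep PySem.Dict.empty).items.foldl cfReshapeStep
        PySem.Dict.empty).items.map (fun q => (q.1, q.2.items))
  have hc : pairs.foldl cfCountStep PySem.Dict.empty = PySem.Dict.counter pairs := by
    rw [← PySem.Dict.foldl_insert_getD_add_one_eq_counter]; rfl
  rw [hc]
  have hi : (PySem.Dict.counter pairs).items =
      (PySem.Set.ofList pairs).map (fun k => (k, (pairs.count k : Int))) :=
    PySem.Dict.items_counter pairs
  rw [hi, reshape_eq _ (PySem.Set.nodup_ofList pairs), foldA_eq]
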